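-- pv_equiv track=rewrite | github.com/gorzalczany/advent-of-code | 2025/11/solve.py | filter_nodes_reaching_node
-- ===== SOURCE A (Python) =====
-- from collections import deque
--
-- def filter_nodes_reaching_node(adjacency_map, end_node):
--     found = set()
--     queue = deque([node for node in adjacency_map if end_node in adjacency_map[node]])
--     while queue:
--         node = queue.popleft()
--         if node in found:
--             continue
--         found.add(node)
--         for adjacent in adjacency_map:
--             if node in adjacency_map[adjacent] and adjacent not in found:
--                 queue.append(adjacent)
--     return found
-- ===== SOURCE B (Python) =====
-- from collections import deque
--
-- def filter_nodes_reaching_node(adjacency_map, end_node):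
--     reverse = {}
--     for node, neighbors in adjacency_map.items():
--         for neighbor in neighbors:
--             reverse.setdefault(neighbor, []).append(node)
--     found = set()
--     queue = deque(reverse.get(end_node, []))
--     while queue:
--         node = queue.popleft()
--         if node in found:
--             continue
--         found.add(node)
--         queue.extend(reverse.get(node, []))
--     return found
-- ===== Notes on version B (the rewrite author's own statement) =====
-- stated objective: alternative
-- what changed: Instead of rescanning every dict entry for each discovered node, B builds a reverse adjacency map once and runs BFS over it.
import Mathlib
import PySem

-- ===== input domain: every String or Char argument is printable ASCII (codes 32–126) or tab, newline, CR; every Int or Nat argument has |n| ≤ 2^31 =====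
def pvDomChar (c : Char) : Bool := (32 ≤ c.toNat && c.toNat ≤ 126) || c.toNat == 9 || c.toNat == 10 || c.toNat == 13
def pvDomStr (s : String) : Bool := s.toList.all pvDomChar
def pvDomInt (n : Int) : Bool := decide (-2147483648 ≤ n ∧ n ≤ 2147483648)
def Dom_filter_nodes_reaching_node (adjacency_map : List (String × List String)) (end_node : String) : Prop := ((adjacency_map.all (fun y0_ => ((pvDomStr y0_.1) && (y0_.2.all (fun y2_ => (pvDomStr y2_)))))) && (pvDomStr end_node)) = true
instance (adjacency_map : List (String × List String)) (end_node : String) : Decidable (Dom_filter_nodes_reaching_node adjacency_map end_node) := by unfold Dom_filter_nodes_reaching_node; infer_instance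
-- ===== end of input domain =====

-- B replaces A's rescan of the whole dict per discovered node by a reverse adjacency map built
-- once and a BFS over it (objective: alternative algorithm; the arguments are not mutated).

-- ===== PORT A =====
-- the while-queue loop of A; the Nat argument is a fuel bound making the recursion total
-- (it is chosen large enough below that it is never exhausted on any input)
def pvLoopA (d : PySem.Dict String (List String)) :
    Nat → PySem.Set String → List String → List String
  | 0, found, _ => found
  | _ + 1, found, [] => found
  | fuel + 1, found, node :: queue =>
    if PySem.Set.contains found node then
      pvLoopA d fuel found queue
    else
      let found' := PySem.Set.add found node
      pvLoopA d fuel found'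
        (queue ++ d.keys.filter (fun adjacent =>
          (d.getD adjacent []).contains node && !(PySem.Set.contains found' adjacent)))

def filter_nodes_reaching_node (adjacency_map : List (String × List String)) (end_node : String) : List String :=
  let d := PySem.Dict.ofList adjacency_map
  pvLoopA d ((d.keys.length + 1) * (d.keys.length + 1)) PySem.Set.empty
    (d.keys.filter (fun node => (d.getD node []).contains end_node))

-- ===== PORT B =====
-- reverse adjacency map: for node, neighbors in items: for neighbor in neighbors: rev.setdefault(neighbor, []).append(node)
def pvRev (d : PySem.Dict String (List String)) : PySem.Dict String (List String) :=
  d.items.foldl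
    (fun r p => p.2.foldl (fun r neighbor => r.modify neighbor [] (· ++ [p.1])) r)
    PySem.Dict.empty

-- B's while-queue loop; fuel as in pvLoopA
def pvLoopB (rev : PySem.Dict String (List String)) :
    Nat → PySem.Set String → List String → List String
  | 0, found, _ => found
  | _ + 1, found, [] => found
  | fuel + 1, found, node :: queue =>
    if PySem.Set.contains found node then
      pvLoopB rev fuel found queue
    else
      pvLoopB rev fuel (PySem.Set.add found node) (queue ++ rev.getD node [])

def filter_nodes_reaching_node_alt (adjacency_map : List (String × List String)) (end_node : String) : List String :=
  let d := PySem.Dict.ofList adjacency_map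
  let rev := pvRev d
  pvLoopB rev ((d.keys.length + 1) * ((d.values.map List.length).sum + 1)) PySem.Set.empty
    (rev.getD end_node [])

-- ===== PRECONDITION & SPEC =====
def Spec_filter_nodes_reaching_node (adjacency_map : List (String × List String)) (end_node : String) (out : List String) : Prop := out = filter_nodes_reaching_node_alt adjacency_map end_node
instance (adjacency_map : List (String × List String)) (end_node : String) (out : List String) : Decidable (Spec_filter_nodes_reaching_node adjacency_map end_node out) := by unfold Spec_filter_nodes_reaching_node; infer_instance

-- ===== CLAIM (what is proved, stated in full; the proofs are below) =====
def Claim_equal_filter_nodes_reaching_node : Prop := ∀ (adjacency_map : List (String × List String)) (end_node : String), Dom_filter_nodes_reaching_node adjacency_map end_node → Spec_filter_nodes_reaching_node adjacency_map end_node (filter_nodes_reaching_node adjacency_map end_node)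

-- ===== LEMMAS AND PROOFS =====

def pvR (d : PySem.Dict String (List String)) (found : List String) : Nat :=
  (d.keys.filter (fun k => !(PySem.Set.contains found k))).length

def pvE (d : PySem.Dict String (List String)) : Nat :=
  (d.values.map List.length).sum

def pvCanon (found q : List String) : List String :=
  PySem.Set.ofList (q.filter (fun z => !(PySem.Set.contains found z)))

lemma pv_ofList_filter (l : List String) (p : String → Bool) :
    PySem.Set.ofList (l.filter p) = (PySem.Set.ofList l).filter p := by
  induction l with
  | nil => simp
  | cons x xs ih =>
    by_cases hp : p x
    · rw [List.filter_cons_of_pos hp, PySem.Set.ofList_cons, PySem.Set.ofList_cons,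
        List.filter_cons_of_pos hp, ih]
      simp only [PySem.Set.discard, List.filter_filter]
      exact congrArg (x :: ·) (List.filter_congr (fun a _ => Bool.and_comm _ _))
    · rw [List.filter_cons_of_neg (by simp [hp]), PySem.Set.ofList_cons,
        List.filter_cons_of_neg (by simp [hp]), ih]
      simp only [PySem.Set.discard, List.filter_filter]
      apply List.filter_congr
      intro a _
      by_cases hax : a == x
      · have : a = x := by exact eq_of_beq hax
        simp [this, hp]
      · simp [hax]

lemma pv_contains_add (found : List String) (a z : String) (ha : PySem.Set.contains found a = false) :
    PySem.Set.contains (PySem.Set.add found a) z = (PySem.Set.contains found z || z == a) := by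
  rw [PySem.Set.add_of_not_mem (fun h => by rw [(PySem.Set.contains_iff found a).mpr h] at ha; cases ha)]
  by_cases hz : z = a
  · subst hz; simp [PySem.Set.contains]
  · simp [PySem.Set.contains, hz]

lemma pv_canon_add (found q : List String) (a : String)
    (ha : PySem.Set.contains found a = false) :
    pvCanon (PySem.Set.add found a) q = (pvCanon found q).filter (fun z => !(z == a)) := by
  unfold pvCanon
  rw [← pv_ofList_filter, List.filter_filter]
  congr 1
  apply List.filter_congr
  intro z _
  rw [pv_contains_add found a z ha]
  by_cases h1 : PySem.Set.contains found z <;> by_cases h2 : z == a <;> simp [h2]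

lemma pv_canon_append (found x y : List String) :
    pvCanon found (x ++ y) =
      pvCanon found x ++ (pvCanon found y).filter (fun z => !(PySem.Set.contains (pvCanon found x) z)) := by
  unfold pvCanon
  rw [List.filter_append, PySem.Set.ofList_append, PySem.Set.update_eq_append_filter]

lemma pv_R_lt (d : PySem.Dict String (List String)) (found : List String) (a : String)
    (hk : a ∈ d.keys) (ha : PySem.Set.contains found a = false) :
    pvR d (PySem.Set.add found a) < pvR d found := by
  unfold pvR
  rw [List.filter_congr (l := d.keys)
      (q := fun z => (!(z == a)) && !(PySem.Set.contains found z))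
      (fun z _ => by rw [pv_contains_add found a z ha]; by_cases h2 : z == a <;> simp [h2]),
    ← List.countP_eq_length_filter, ← List.countP_eq_length_filter, ← List.countP_filter,
    List.countP_eq_length_filter, List.countP_eq_length_filter]
  have hmem : a ∈ d.keys.filter (fun k => !(PySem.Set.contains found k)) :=
    List.mem_filter.mpr ⟨hk, by rw [ha]; rfl⟩
  calc (List.filter (fun z => !(z == a)) (List.filter (fun k => !(PySem.Set.contains found k)) d.keys)).length
      < (List.filter (fun k => !(PySem.Set.contains found k)) d.keys).length := by
        rw [← List.countP_eq_length_filter]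
        exact List.countP_lt_length_iff.mpr ⟨a, hmem, by simp⟩

lemma pv_loopB_all_found (rev : PySem.Dict String (List String)) :
    ∀ (fuel : Nat) (found q : List String), (∀ x ∈ q, PySem.Set.contains found x = true) →
    q.length ≤ fuel → pvLoopB rev fuel found q = found
  | 0, found, [], _, _ => rfl
  | _ + 1, found, [], _, _ => rfl
  | fuel + 1, found, node :: queue, h, hf => by
    unfold pvLoopB
    rw [if_pos (h node (List.mem_cons_self))]
    exact pv_loopB_all_found rev fuel found queue (fun x hx => h x (List.mem_cons_of_mem _ hx))
      (by simpa using Nat.le_of_succ_le_succ (by simpa using hf))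

lemma pv_foldl_flat (l : List (String × List String)) (r : PySem.Dict String (List String)) :
    l.foldl (fun r p => p.2.foldl (fun r neighbor => r.modify neighbor [] (· ++ [p.1])) r) r
      = (l.flatMap (fun p => p.2.map (fun nb => (nb, p.1)))).foldl
          (fun r e => r.modify e.1 [] (· ++ [e.2])) r := by
  induction l generalizing r with
  | nil => rfl
  | cons p t ih =>
    simp only [List.flatMap_cons, List.foldl_append, List.foldl_map, List.foldl]
    rw [← ih]

lemma pv_rev_getD (d : PySem.Dict String (List String)) (n : String) :
    (pvRev d).getD n [] =
      ((d.items.flatMap (fun p => p.2.map (fun nb => (nb, p.1)))).filter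
        (fun e => e.1 == n)).map (fun e => e.2) := by
  unfold pvRev
  rw [pv_foldl_flat]
  simpa using PySem.Dict.getD_foldl_modify_append
    (d.items.flatMap (fun p => p.2.map (fun nb => (nb, p.1)))) PySem.Dict.empty n

lemma pv_edges (l : List (String × List String)) (n : String) :
    ((l.flatMap (fun p => p.2.map (fun nb => (nb, p.1)))).filter
        (fun e => e.1 == n)).map (fun e => e.2)
      = l.flatMap (fun p => (p.2.filter (fun z => z == n)).map (fun _ => p.1)) := by
  induction l with
  | nil => rfl
  | cons p t ih =>
    simp only [List.flatMap_cons, List.filter_append, List.map_append, ih, List.filter_map,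
      List.map_map]
    rfl

lemma pv_ofList_const (c : String) (l : List String) :
    PySem.Set.ofList (l.map (fun _ => c)) = if l.isEmpty then [] else [c] := by
  induction l with
  | nil => rfl
  | cons x t ih =>
    rw [List.map_cons, PySem.Set.ofList_cons, ih]
    by_cases h : t.isEmpty <;> simp [h, PySem.Set.discard]

lemma pv_L1 (n : String) :
    ∀ (l : List (String × List String)), (l.map Prod.fst).Nodup →
    PySem.Set.ofList (l.flatMap (fun p => (p.2.filter (fun z => z == n)).map (fun _ => p.1)))
      = (l.filter (fun p => p.2.contains n)).map Prod.fst := by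
  intro l
  induction l with
  | nil => intro _; rfl
  | cons p t ih =>
    intro hnd
    have hnd' : (t.map Prod.fst).Nodup := (List.nodup_cons.mp (by simpa using hnd)).2
    have hp1 : p.1 ∉ t.map Prod.fst := (List.nodup_cons.mp (by simpa using hnd)).1
    rw [List.flatMap_cons, PySem.Set.ofList_append, PySem.Set.update_eq_append_filter,
      ih hnd']
    by_cases h : p.2.contains n
    · have hmm : n ∈ p.2 := by simpa using h
      have hne : ¬ (p.2.filter (fun z => z == n)).isEmpty = true := by
        intro hcontra
        rw [List.isEmpty_iff, List.filter_eq_nil_iff] at hcontra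
        exact hcontra n hmm (by simp)
      rw [pv_ofList_const, if_neg hne, List.filter_cons_of_pos (by simpa using h), List.map_cons]
      have hid : List.filter (fun y => !(PySem.Set.contains [p.1] y))
          (List.map Prod.fst (List.filter (fun p => p.2.contains n) t))
          = List.map Prod.fst (List.filter (fun p => p.2.contains n) t) := by
        rw [List.filter_eq_self]
        intro z hz
        have hzt : z ∈ t.map Prod.fst := by
          rcases List.mem_map.mp hz with ⟨q, hq, rfl⟩
          exact List.mem_map_of_mem (List.mem_of_mem_filter hq)
        have : z ≠ p.1 := fun hzp => hp1 (hzp ▸ hzt)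
        simp [PySem.Set.contains, this]
      rw [hid]
      rfl
    · have hnil : p.2.filter (fun z => z == n) = [] := by
        rw [List.filter_eq_nil_iff]
        intro z hz hzn
        have : z = n := eq_of_beq hzn
        subst this
        exact h (by simpa using hz)
      rw [hnil, List.map_nil, List.filter_cons_of_neg (by simpa using h)]
      simp [PySem.Set.contains]

lemma pv_rev_ofList (d : PySem.Dict String (List String)) (hnd : d.keys.Nodup) (n : String) :
    PySem.Set.ofList ((pvRev d).getD n []) =
      d.keys.filter (fun a => (d.getD a []).contains n) := by
  rw [pv_rev_getD, pv_edges, pv_L1 n d.items (by simpa [PySem.Dict.keys] using hnd)]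
  rw [PySem.Dict.items_eq_map_keys d hnd []]
  rw [List.filter_map, List.map_map]
  simp [Function.comp_def]

lemma pv_rev_mem (d : PySem.Dict String (List String)) (hnd : d.keys.Nodup) (n x : String)
    (hx : x ∈ (pvRev d).getD n []) : x ∈ d.keys := by
  have : x ∈ PySem.Set.ofList ((pvRev d).getD n []) := (PySem.Set.mem_ofList _ x).mpr hx
  rw [pv_rev_ofList d hnd n] at this
  exact List.mem_of_mem_filter this

lemma pv_rev_len (d : PySem.Dict String (List String)) (n : String) :
    ((pvRev d).getD n []).length ≤ pvE d := by
  rw [pv_rev_getD, List.length_map]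
  calc ((d.items.flatMap (fun p => p.2.map (fun nb => (nb, p.1)))).filter (fun e => e.1 == n)).length
      ≤ (d.items.flatMap (fun p => p.2.map (fun nb => (nb, p.1)))).length :=
        List.length_filter_le _ _
    _ = (d.items.map (fun p => p.2.length)).sum := by
        rw [List.length_flatMap]; simp
    _ = pvE d := by
      unfold pvE
      simp only [PySem.Dict.values, List.map_map]
      rfl

lemma pv_sim (d : PySem.Dict String (List String)) (hnd : d.keys.Nodup) :
    ∀ (N fa fb : Nat) (found qA qB : List String),
      pvR d found * (d.keys.length + pvE d + 2) + qA.length + qB.length ≤ N →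
      (∀ x ∈ qA, x ∈ d.keys) → (∀ x ∈ qB, x ∈ d.keys) →
      pvR d found * (d.keys.length + 1) + qA.length ≤ fa →
      pvR d found * (pvE d + 1) + qB.length ≤ fb →
      pvCanon found qA = pvCanon found qB →
      pvLoopA d fa found qA = pvLoopB (pvRev d) fb found qB := by
  intro N
  induction N with
  | zero =>
    intro fa fb found qA qB hN hqA hqB hfa hfb hc
    have hA : qA = [] := List.eq_nil_of_length_eq_zero (by omega)
    have hB : qB = [] := List.eq_nil_of_length_eq_zero (by omega)
    subst hA; subst hB
    cases fa <;> cases fb <;> rfl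
  | succ N ih =>
    intro fa fb found qA qB hN hqA hqB hfa hfb hc
    cases qA with
    | nil =>
      have hcB : pvCanon found qB = [] := by rw [← hc]; rfl
      have hall : ∀ x ∈ qB, PySem.Set.contains found x = true := by
        intro x hx
        by_contra hcon
        have hxf : x ∈ qB.filter (fun z => !(PySem.Set.contains found z)) :=
          List.mem_filter.mpr ⟨hx, by simp at hcon ⊢; exact hcon⟩
        have : x ∈ pvCanon found qB := (PySem.Set.mem_ofList _ x).mpr hxf
        rw [hcB] at this
        cases this
      have hres : pvLoopB (pvRev d) fb found qB = found :=
        pv_loopB_all_found (pvRev d) fb found qB hall (by omega)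
      rw [hres]
      cases fa <;> rfl
    | cons a restA =>
      obtain ⟨fa', rfl⟩ : ∃ fa', fa = fa' + 1 := ⟨fa - 1, by simp [List.length_cons] at hfa; omega⟩
      by_cases ha : PySem.Set.contains found a = true
      · have hstep : pvLoopA d (fa' + 1) found (a :: restA) = pvLoopA d fa' found restA := by
          simp only [pvLoopA]; rw [ha]; simp
        rw [hstep]
        apply ih fa' fb found restA qB
        · simp [List.length_cons] at hN; omega
        · exact fun x hx => hqA x (List.mem_cons_of_mem _ hx)
        · exact hqB
        · simp [List.length_cons] at hfa; omega
        · exact hfb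
        · rw [← hc]
          unfold pvCanon
          rw [List.filter_cons_of_neg (by rw [ha]; simp)]
      · have haf : PySem.Set.contains found a = false := Bool.eq_false_iff.mpr ha
        have hpa : (!(PySem.Set.contains found a)) = true := by rw [haf]; rfl
        have hcA : pvCanon found (a :: restA) = a :: PySem.Set.discard (pvCanon found restA) a := by
          unfold pvCanon
          rw [List.filter_cons_of_pos (p := fun z => !(PySem.Set.contains found z)) hpa, PySem.Set.ofList_cons]
        cases qB with
        | nil =>
          exfalso
          rw [hcA] at hc
          have : pvCanon found ([] : List String) = [] := rfl
          rw [this] at hc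
          cases hc
        | cons b restB =>
          obtain ⟨fb', rfl⟩ : ∃ fb', fb = fb' + 1 := ⟨fb - 1, by simp [List.length_cons] at hfb; omega⟩
          by_cases hb : PySem.Set.contains found b = true
          · have hstep : pvLoopB (pvRev d) (fb' + 1) found (b :: restB) = pvLoopB (pvRev d) fb' found restB := by
              simp only [pvLoopB]; rw [hb]; simp
            rw [hstep]
            apply ih (fa' + 1) fb' found (a :: restA) restB
            · simp [List.length_cons] at hN ⊢; omega
            · exact hqA
            · exact fun x hx => hqB x (List.mem_cons_of_mem _ hx)
            · exact hfa
            · simp [List.length_cons] at hfb; omega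
            · rw [hc]
              unfold pvCanon
              rw [List.filter_cons_of_neg (by rw [hb]; simp)]
          · have hbf : PySem.Set.contains found b = false := Bool.eq_false_iff.mpr hb
            have hpb : (!(PySem.Set.contains found b)) = true := by rw [hbf]; rfl
            have hcB : pvCanon found (b :: restB) = b :: PySem.Set.discard (pvCanon found restB) b := by
              unfold pvCanon
              rw [List.filter_cons_of_pos (p := fun z => !(PySem.Set.contains found z)) hpb, PySem.Set.ofList_cons]
            rw [hcA, hcB] at hc
            obtain ⟨hab, htail⟩ := List.cons_eq_cons.mp hc
            subst hab
            -- discovery step on both sides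
            have hstepA : pvLoopA d (fa' + 1) found (a :: restA)
                = pvLoopA d fa' (PySem.Set.add found a)
                    (restA ++ d.keys.filter (fun adjacent =>
                      (d.getD adjacent []).contains a &&
                        !(PySem.Set.contains (PySem.Set.add found a) adjacent))) := by
              simp only [pvLoopA]; rw [haf]; simp
            have hstepB : pvLoopB (pvRev d) (fb' + 1) found (a :: restB)
                = pvLoopB (pvRev d) fb' (PySem.Set.add found a) (restB ++ (pvRev d).getD a []) := by
              simp only [pvLoopB]; rw [haf]; simp
            rw [hstepA, hstepB]
            set found' := PySem.Set.add found a with hfound'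
            set appA := d.keys.filter (fun adjacent =>
              (d.getD adjacent []).contains a && !(PySem.Set.contains found' adjacent)) with happA
            have hka : a ∈ d.keys := hqA a List.mem_cons_self
            have hRlt : pvR d found' < pvR d found := pv_R_lt d found a hka haf
            have hlappA : appA.length ≤ d.keys.length := by
              rw [happA]; exact List.length_filter_le _ _
            have hlappB : ((pvRev d).getD a []).length ≤ pvE d := pv_rev_len d a
            -- canonical queues agree
            have hrest : pvCanon found' restA = pvCanon found' restB := by
              rw [pv_canon_add found restA a haf, pv_canon_add found restB a haf]
              simpa [PySem.Set.discard] using htail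
            have happ : pvCanon found' appA = pvCanon found' ((pvRev d).getD a []) := by
              have h1 : pvCanon found' appA = appA := by
                unfold pvCanon
                rw [List.filter_eq_self.mpr (fun z hz => by
                  have := (List.mem_filter.mp (happA ▸ hz)).2
                  exact (Bool.and_eq_true _ _ |>.mp this).2)]
                exact PySem.Set.ofList_eq_self_of_nodup _ (happA ▸ hnd.filter _)
              have h2 : pvCanon found' ((pvRev d).getD a []) = appA := by
                unfold pvCanon
                rw [pv_ofList_filter, pv_rev_ofList d hnd a, List.filter_filter, happA]
                exact List.filter_congr (fun z _ => Bool.and_comm _ _)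
              rw [h1, h2]
            have hcan : pvCanon found' (restA ++ appA) = pvCanon found' (restB ++ (pvRev d).getD a []) := by
              rw [pv_canon_append, pv_canon_append, hrest, happ]
            -- arithmetic
            have hmul1 : pvR d found' * (d.keys.length + pvE d + 2) + (d.keys.length + pvE d + 2)
                ≤ pvR d found * (d.keys.length + pvE d + 2) := by
              calc pvR d found' * (d.keys.length + pvE d + 2) + (d.keys.length + pvE d + 2)
                  = (pvR d found' + 1) * (d.keys.length + pvE d + 2) := by ring
                _ ≤ pvR d found * (d.keys.length + pvE d + 2) :=
                    Nat.mul_le_mul_right _ hRlt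
            have hmul2 : pvR d found' * (d.keys.length + 1) + (d.keys.length + 1)
                ≤ pvR d found * (d.keys.length + 1) := by
              calc pvR d found' * (d.keys.length + 1) + (d.keys.length + 1)
                  = (pvR d found' + 1) * (d.keys.length + 1) := by ring
                _ ≤ pvR d found * (d.keys.length + 1) := Nat.mul_le_mul_right _ hRlt
            have hmul3 : pvR d found' * (pvE d + 1) + (pvE d + 1)
                ≤ pvR d found * (pvE d + 1) := by
              calc pvR d found' * (pvE d + 1) + (pvE d + 1)
                  = (pvR d found' + 1) * (pvE d + 1) := by ring
                _ ≤ pvR d found * (pvE d + 1) := Nat.mul_le_mul_right _ hRlt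
            apply ih fa' fb' found' (restA ++ appA) (restB ++ (pvRev d).getD a [])
            · simp only [List.length_append, List.length_cons] at hN ⊢; omega
            · intro x hx
              rcases List.mem_append.mp hx with h | h
              · exact hqA x (List.mem_cons_of_mem _ h)
              · exact List.mem_of_mem_filter (happA ▸ h)
            · intro x hx
              rcases List.mem_append.mp hx with h | h
              · exact hqB x (List.mem_cons_of_mem _ h)
              · exact pv_rev_mem d hnd a x h
            · simp only [List.length_append, List.length_cons] at hfa ⊢; omega
            · simp only [List.length_append, List.length_cons] at hfb ⊢; omega
            · exact hcan

lemma pv_R_empty (d : PySem.Dict String (List String)) : pvR d PySem.Set.empty = d.keys.length := by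
  unfold pvR
  rw [show (List.filter (fun k => !(PySem.Set.contains PySem.Set.empty k)) d.keys) = d.keys from
    List.filter_eq_self.mpr (fun z _ => rfl)]

lemma pv_canon_empty (q : List String) : pvCanon PySem.Set.empty q = PySem.Set.ofList q := by
  unfold pvCanon
  rw [show (List.filter (fun z => !(PySem.Set.contains PySem.Set.empty z)) q) = q from
    List.filter_eq_self.mpr (fun z _ => rfl)]

theorem pv_main (am : List (String × List String)) (en : String) :
    filter_nodes_reaching_node am en = filter_nodes_reaching_node_alt am en := by
  unfold filter_nodes_reaching_node filter_nodes_reaching_node_alt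
  have hnd : (PySem.Dict.ofList am).keys.Nodup := PySem.Dict.nodup_keys_ofList am
  set d := PySem.Dict.ofList am with hd
  set seedsA := d.keys.filter (fun node => (d.getD node []).contains en) with hsA
  set sB := (pvRev d).getD en [] with hsB
  show pvLoopA d ((d.keys.length + 1) * (d.keys.length + 1)) PySem.Set.empty seedsA
      = pvLoopB (pvRev d) ((d.keys.length + 1) * ((d.values.map List.length).sum + 1)) PySem.Set.empty sB
  have hE : (d.values.map List.length).sum = pvE d := rfl
  rw [hE]
  apply pv_sim d hnd (pvR d PySem.Set.empty * (d.keys.length + pvE d + 2) + seedsA.length + sB.length)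
  · exact le_refl _
  · exact fun x hx => List.mem_of_mem_filter (hsA ▸ hx)
  · exact fun x hx => pv_rev_mem d hnd en x (hsB ▸ hx)
  · rw [pv_R_empty]
    have h1 : seedsA.length ≤ d.keys.length := hsA ▸ List.length_filter_le _ _
    have h2 : (d.keys.length + 1) * (d.keys.length + 1)
        = d.keys.length * (d.keys.length + 1) + (d.keys.length + 1) := by ring
    omega
  · rw [pv_R_empty]
    have h1 : sB.length ≤ pvE d := hsB ▸ pv_rev_len d en
    have h2 : (d.keys.length + 1) * (pvE d + 1)
        = d.keys.length * (pvE d + 1) + (pvE d + 1) := by ring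
    omega
  · rw [pv_canon_empty, pv_canon_empty, hsA, hsB,
      PySem.Set.ofList_eq_self_of_nodup _ (hnd.filter _), pv_rev_ofList d hnd en]

-- ===== VERDICT (by name: the statement is the Claim_ definition above) =====
theorem filter_nodes_reaching_node_spec : Claim_equal_filter_nodes_reaching_node := by
  intro adjacency_map end_node _
  unfold Spec_filter_nodes_reaching_node
  exact pv_main adjacency_map end_node
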